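-- pv_equiv track=rewrite | github.com/Cycadophyta/bioinformatics-tools | Replication.py | symbol_array
-- ===== SOURCE A (Python) =====
-- def kmer_count(seq, kmer):
--     '''Counts occurences of a kmer in a sequence.'''
--     count = 0
--     for i in range(len(seq)-len(kmer)+1):
--         if seq[i:i+len(kmer)] == kmer:
--             count += 1
--     return count
--
-- def symbol_array(genome, symbol):
--     '''Calculates the relative proportions of a symbol in opposing halves
--     of the genome.
--     '''
--
--     array = {}
--     n = len(genome)
--     extended_genome = genome + genome[0:n//2]
--
--     # look at the first half of genome to compute first array value
--     array[0] = kmer_count(symbol, genome[0:n//2])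
--
--     for i in range(1, n):
--         # set the current array value equal to the previous array value
--         array[i] = array[i-1]
--
--         # current array value can differ from previous value by at most 1
--         if extended_genome[i-1] == symbol:
--             array[i] = array[i]-1
--         if extended_genome[i+(n//2)-1] == symbol:
--             array[i] = array[i]+1
--     return array
-- ===== SOURCE B (Python) =====
-- def kmer_count(seq, kmer):
--     '''Counts occurences of a kmer in a sequence.'''
--     count = 0
--     for i in range(len(seq)-len(kmer)+1):
--         if seq[i:i+len(kmer)] == kmer:
--             count += 1
--     return count
--
-- def symbol_array(genome, symbol):
--     '''Calculates the relative proportions of a symbol in opposing halves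
--     of the genome, via a prefix-sum table instead of a running delta.
--     '''
--     n = len(genome)
--     half = n // 2
--     extended_genome = genome + genome[0:half]
--
--     # same base value as the original (kmer_count(symbol, first half))
--     base = kmer_count(symbol, genome[0:half])
--
--     # prefix[k] = number of positions j < k with extended_genome[j] == symbol
--     prefix = [0]
--     total = 0
--     for ch in extended_genome:
--         total += 1 if ch == symbol else 0
--         prefix.append(total)
--
--     array = {0: base}
--     for i in range(1, n):
--         array[i] = base - prefix[i] + prefix[i + half] - prefix[half]
--     return array
-- ===== Notes on version B (the rewrite author's own statement) =====
-- stated objective: alternative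
-- what changed: Replaces A's sequential running-delta recurrence (each array[i] derived from array[i-1] with +/-1 updates) by a precomputed prefix-sum table over the extended genome, each array[i] computed independently by constant-time table lookups; the base value array[0] is the same kmer_count call.
import Mathlib
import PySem

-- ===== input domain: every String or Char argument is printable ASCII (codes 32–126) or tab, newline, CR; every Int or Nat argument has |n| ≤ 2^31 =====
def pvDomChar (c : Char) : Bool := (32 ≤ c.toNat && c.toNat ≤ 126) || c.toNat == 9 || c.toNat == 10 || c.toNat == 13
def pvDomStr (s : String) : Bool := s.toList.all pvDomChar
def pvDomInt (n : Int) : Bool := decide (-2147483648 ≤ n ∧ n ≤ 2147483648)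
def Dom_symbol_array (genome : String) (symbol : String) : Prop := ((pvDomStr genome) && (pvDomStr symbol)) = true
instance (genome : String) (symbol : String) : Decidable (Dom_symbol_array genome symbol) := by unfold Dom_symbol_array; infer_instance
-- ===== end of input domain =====

-- B replaces A's running ±1 delta over the loop by a precomputed prefix-sum table with
-- constant-time lookups (same O(n) cost, a genuinely different decomposition; objective: alternative).
-- Strings are ported as lists of code points (List Char), A's dict as PySem.Dict.

-- ===== PORT A =====
-- helper kmer_count(seq, kmer) (strings ported as List Char)
def kmer_count (seq : List Char) (kmer : List Char) : Int :=
  (PySem.List.pyRange 0 ((seq.length : Int) - (kmer.length : Int) + 1)).foldl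
    (fun count i =>
      if PySem.List.slice seq (some i) (some (i + (kmer.length : Int))) == kmer
      then count + 1 else count) 0

def symbol_array (genome : String) (symbol : String) : List (Int × Int) :=
  let g := genome.toList
  let n : Int := (g.length : Int)
  let ext := g ++ PySem.List.slice g (some 0) (some (PySem.Int.floordiv n 2))
  -- array = {}; array[0] = kmer_count(symbol, genome[0:n//2])
  let d0 : PySem.Dict Int Int :=
    PySem.Dict.insert ⟨[]⟩ 0
      (kmer_count symbol.toList (PySem.List.slice g (some 0) (some (PySem.Int.floordiv n 2))))
  ((PySem.List.pyRange 1 n).foldl (fun d i =>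
      -- array[i] = array[i-1] (the key i-1 is always present, so getD reads it exactly)
      let v0 := d.getD (i - 1) 0
      -- if extended_genome[i-1] == symbol: array[i] -= 1   (char vs whole string, as in Python)
      let v1 := if (PySem.List.pyGet? ext (i - 1)).map (fun c => [c]) == some symbol.toList
                then v0 - 1 else v0
      -- if extended_genome[i+(n//2)-1] == symbol: array[i] += 1
      let v2 := if (PySem.List.pyGet? ext (i + PySem.Int.floordiv n 2 - 1)).map (fun c => [c]) == some symbol.toList
                then v1 + 1 else v1
      d.insert i v2) d0).items

-- ===== PORT B =====
-- Source B's identical helper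
def kmer_count_alt (seq : List Char) (kmer : List Char) : Int :=
  (PySem.List.pyRange 0 ((seq.length : Int) - (kmer.length : Int) + 1)).foldl
    (fun count i =>
      if PySem.List.slice seq (some i) (some (i + (kmer.length : Int))) == kmer
      then count + 1 else count) 0

def symbol_array_alt (genome : String) (symbol : String) : List (Int × Int) :=
  let g := genome.toList
  let n : Int := (g.length : Int)
  let half := PySem.Int.floordiv n 2
  let ext := g ++ PySem.List.slice g (some 0) (some half)
  let base := kmer_count_alt symbol.toList (PySem.List.slice g (some 0) (some half))
  -- prefix-sum table: prefix = [0]; total = 0; for ch in ext: total += (ch == symbol); prefix.append(total)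
  let pt := ext.foldl (fun (pt : List Int × Int) ch =>
      let total := pt.2 + (if [ch] == symbol.toList then 1 else 0)
      (pt.1 ++ [total], total)) ([0], 0)
  let pfx := pt.1
  -- array = {0: base}; for i in range(1, n): array[i] = base - prefix[i] + prefix[i+half] - prefix[half]
  -- (all keys are fresh and distinct, so the dict's items list is exactly this append loop)
  (PySem.List.pyRange 1 n).foldl (fun arr i =>
      arr ++ [(i, base - PySem.List.pyGetD pfx i 0 + PySem.List.pyGetD pfx (i + half) 0
                   - PySem.List.pyGetD pfx half 0)])
    [(0, base)]

-- ===== PRECONDITION & SPEC =====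
def Spec_symbol_array (genome : String) (symbol : String) (out : List (Int × Int)) : Prop := out = symbol_array_alt genome symbol
instance (genome : String) (symbol : String) (out : List (Int × Int)) : Decidable (Spec_symbol_array genome symbol out) := by unfold Spec_symbol_array; infer_instance

-- ===== CLAIM (what is proved, stated in full; the proofs are below) =====
def Claim_equal_symbol_array : Prop := ∀ (genome : String) (symbol : String), Dom_symbol_array genome symbol → Spec_symbol_array genome symbol (symbol_array genome symbol)

-- ===== LEMMAS AND PROOFS =====

-- 0/1 indicator of a position matching the symbol (char-vs-string comparison, as both Pythons do)
def pvInd (s : List Char) (c : Char) : Int := if [c] == s then 1 else 0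

-- number of matches among the first k characters of ext
def pvCnt (s ext : List Char) (k : Nat) : Int := ((ext.take k).map (pvInd s)).sum

-- A's loop value at index j (closed recurrence of the dict values)
def pvV (s ext : List Char) (hf : Nat) (base : Int) : Nat → Int
  | 0 => base
  | j+1 =>
      let v0 := pvV s ext hf base j
      let v1 := if (PySem.List.pyGet? ext (j : Int)).map (fun c => [c]) == some s then v0 - 1 else v0
      if (PySem.List.pyGet? ext ((j : Int) + (hf : Int))).map (fun c => [c]) == some s then v1 + 1 else v1

theorem pvCnt_succ (s ext : List Char) (k : Nat) (hk : k < ext.length) :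
    pvCnt s ext (k+1) = pvCnt s ext k + pvInd s ext[k] := by
  have hk' : k < (ext.map (pvInd s)).length := by simpa using hk
  unfold pvCnt
  rw [List.map_take, List.map_take, List.sum_take_succ _ _ hk']
  simp

theorem pvPyRange_one (m : Nat) :
    PySem.List.pyRange 1 (m : Int) = (List.range (m-1)).map (fun j => (((j+1 : Nat)) : Int)) := by
  induction m with
  | zero => decide
  | succ k ih =>
    rcases Nat.eq_zero_or_pos k with hk | hk
    · subst hk; decide
    · have h1 : (1:Int) ≤ (k:Int) := by exact_mod_cast hk
      have h2 : ((k+1 : Nat) : Int) = (k : Int) + 1 := by push_cast; ring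
      rw [h2, PySem.List.pyRange_one_succ_right h1, ih]
      have hk1 : k - 1 + 1 = k := Nat.succ_pred_eq_of_pos hk
      have h3 : List.range k = List.range (k-1) ++ [k-1] := by
        conv_lhs => rw [← hk1, List.range_succ]
      simp only [Nat.succ_sub_one, h3, List.map_append, List.map_cons, List.map_nil]
      congr 1
      simp [hk1]

theorem pvFind_range (f : Nat → Int) (r t : Nat) (ht : t < r) :
    List.find? (fun p => p.1 == ((t : Nat) : Int)) ((List.range r).map (fun (j : Nat) => ((j : Int), f j)))
      = some ((t : Int), f t) := by
  induction r with
  | zero => omega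
  | succ k ih =>
    rw [List.range_succ, List.map_append, List.find?_append]
    rcases Nat.lt_or_ge t k with h | h
    · rw [ih h]; rfl
    · have : t = k := by omega
      subst this
      have hn : List.find? (fun p => p.1 == ((t : Nat) : Int)) ((List.range t).map (fun (j : Nat) => ((j : Int), f j))) = none := by
        rw [List.find?_eq_none]
        intro x hx
        simp only [List.mem_map, List.mem_range] at hx
        obtain ⟨j, hj, rfl⟩ := hx
        have : (j:Int) ≠ (t:Int) := by exact_mod_cast Nat.ne_of_lt hj
        simp [this]
      rw [hn]; simp

theorem pvNotContains_range (f : Nat → Int) (r : Nat) :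
    ((List.range r).map (fun (j : Nat) => ((j : Int), f j))).any (fun p => p.1 == ((r : Nat) : Int)) = false := by
  simp only [List.any_eq_false, List.mem_map, List.mem_range]
  rintro x ⟨j, hj, rfl⟩
  have : (j:Int) ≠ (r:Int) := by exact_mod_cast Nat.ne_of_lt hj
  simp [this]

-- B's prefix-sum fold produces the table of pvCnt values
theorem pvPrefix_spec (s : List Char) (cs : List Char) (acc : List Int) (t : Int) :
    cs.foldl (fun (pt : List Int × Int) ch =>
      (pt.1 ++ [pt.2 + (if [ch] == s then 1 else 0)], pt.2 + (if [ch] == s then 1 else 0))) (acc, t)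
    = (acc ++ (List.range cs.length).map (fun k => t + pvCnt s cs (k+1)), t + pvCnt s cs cs.length) := by
  induction cs generalizing acc t with
  | nil => simp [pvCnt]
  | cons c cs ih =>
    simp only [List.foldl_cons]
    rw [ih]
    have hcnt : ∀ k, pvCnt s (c :: cs) (k+1) = pvInd s c + pvCnt s cs k := by
      intro k; unfold pvCnt; simp [List.take_succ_cons, pvInd]
    rw [Prod.mk.injEq]
    refine ⟨?_, ?_⟩
    · rw [List.append_assoc]
      congr 1
      rw [List.length_cons, List.range_succ_eq_map]
      simp only [List.map_cons, List.map_map, List.singleton_append]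
      congr 1
      · rw [hcnt 0]; simp [pvCnt, pvInd]
      · apply List.map_congr_left
        intro j hj
        simp only [Function.comp]
        rw [Nat.succ_eq_add_one, hcnt (j+1)]
        simp only [pvInd]
        ring
    · rw [List.length_cons, hcnt cs.length]
      simp only [pvInd]
      ring

theorem pvGet_nat (ext : List Char) (k : Nat) (hk : k < ext.length) :
    PySem.List.pyGet? ext (k : Int) = some ext[k] := by
  simp [PySem.List.pyGet?, PySem.List.pyIdx?, hk]

-- closed form of A's recurrence
theorem pvV_closed (s ext : List Char) (hf m : Nat) (base : Int) (hlen : ext.length = m + hf)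
    (j : Nat) (hj : j ≤ m) :
    pvV s ext hf base j = base - pvCnt s ext j + pvCnt s ext (j + hf) - pvCnt s ext hf := by
  induction j with
  | zero => simp [pvV, pvCnt]
  | succ j ih =>
    have hj' : j ≤ m := by omega
    have h1 : j < ext.length := by omega
    have h2 : j + hf < ext.length := by omega
    have hc : ((j : Int) + (hf : Int)) = ((j + hf : Nat) : Int) := by push_cast; ring
    rw [pvV, pvGet_nat ext j h1, hc, pvGet_nat ext (j+hf) h2, ih hj']
    have e1 := pvCnt_succ s ext j h1
    have e2 := pvCnt_succ s ext (j+hf) h2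
    have hadd : j + 1 + hf = (j + hf) + 1 := by omega
    rw [hadd, e2, e1]
    simp only [pvInd, Option.map_some]
    by_cases c1 : ([ext[j]] == s) = true <;> by_cases c2 : ([ext[j+hf]] == s) = true <;>
      simp [c1, c2] <;> ring

-- A's dict-building loop in closed form (step lambda in its zeta-expanded shape)
theorem pvA_fold (s ext : List Char) (hf : Nat) (base : Int) (r : Nat) :
    (((List.range r).map (fun j : Nat => ((j+1 : Nat) : Int))).foldl
      (fun d i => PySem.Dict.insert d i
        (if (PySem.List.pyGet? ext (i + (hf : Int) - 1)).map (fun c => [c]) == some s then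
           (if (PySem.List.pyGet? ext (i - 1)).map (fun c => [c]) == some s then
              PySem.Dict.getD d (i - 1) 0 - 1 else PySem.Dict.getD d (i - 1) 0) + 1
         else if (PySem.List.pyGet? ext (i - 1)).map (fun c => [c]) == some s then
              PySem.Dict.getD d (i - 1) 0 - 1 else PySem.Dict.getD d (i - 1) 0))
      (PySem.Dict.insert ⟨[]⟩ 0 base)).items
    = (List.range (r+1)).map (fun j : Nat => ((j : Int), pvV s ext hf base j)) := by
  induction r with
  | zero =>
    simp [PySem.Dict.insert, PySem.Dict.contains, pvV]
  | succ r ih =>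
    rw [List.range_succ, List.map_append, List.foldl_append]
    simp only [List.map_cons, List.map_nil, List.foldl_cons, List.foldl_nil]
    set D := (((List.range r).map (fun j : Nat => ((j+1 : Nat) : Int))).foldl
      (fun d i => PySem.Dict.insert d i
        (if (PySem.List.pyGet? ext (i + (hf : Int) - 1)).map (fun c => [c]) == some s then
           (if (PySem.List.pyGet? ext (i - 1)).map (fun c => [c]) == some s then
              PySem.Dict.getD d (i - 1) 0 - 1 else PySem.Dict.getD d (i - 1) 0) + 1
         else if (PySem.List.pyGet? ext (i - 1)).map (fun c => [c]) == some s then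
              PySem.Dict.getD d (i - 1) 0 - 1 else PySem.Dict.getD d (i - 1) 0))
      (PySem.Dict.insert ⟨[]⟩ 0 base)) with hD
    have hitems : D.items = (List.range (r+1)).map (fun j : Nat => ((j : Int), pvV s ext hf base j)) := ih
    have hsub : ((r+1 : Nat) : Int) - 1 = ((r : Nat) : Int) := by push_cast; ring
    have hget : PySem.Dict.getD D (((r+1 : Nat) : Int) - 1) 0 = pvV s ext hf base r := by
      rw [hsub]
      unfold PySem.Dict.getD PySem.Dict.get?
      rw [hitems, pvFind_range (fun j => pvV s ext hf base j) (r+1) r (by omega)]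
      rfl
    have hcont : PySem.Dict.contains D ((r+1 : Nat) : Int) = false := by
      unfold PySem.Dict.contains
      rw [hitems]
      exact pvNotContains_range _ (r+1)
    have hidx2 : ((r+1 : Nat) : Int) + (hf : Int) - 1 = ((r : Nat) : Int) + (hf : Int) := by push_cast; ring
    show (PySem.Dict.insert D _ _).items = _
    simp only [hget]
    simp only [hsub, hidx2]
    show (PySem.Dict.insert D ((r+1 : Nat) : Int) (pvV s ext hf base (r+1))).items = _
    unfold PySem.Dict.insert
    rw [hcont]
    simp only [Bool.false_eq_true, if_false]
    rw [hitems]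
    conv_rhs => rw [List.range_succ, List.map_append]
    simp

-- prefix-table lookup at a Nat index
theorem pvPfx_get (s ext : List Char) (L k : Nat) (hk : k ≤ L) :
    PySem.List.pyGetD (0 :: (List.range L).map (fun k => 0 + pvCnt s ext (k+1))) ((k : Nat) : Int) 0
      = pvCnt s ext k := by
  rw [PySem.List.pyGetD_of_nonneg _ _ (by positivity)]
  rw [Int.toNat_natCast]
  cases k with
  | zero => simp [pvCnt]
  | succ k =>
    show (0 :: (List.range L).map (fun k => 0 + pvCnt s ext (k+1))).getD (k+1) 0 = _
    rw [List.getD_cons_succ]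
    rw [PySem.List.getD_map_range _ _ _ _ (by omega)]
    ring

-- ===== VERDICT (by name: the statement is the Claim_ definition above) =====
theorem symbol_array_spec : Claim_equal_symbol_array := by
  intro genome symbol _
  unfold Spec_symbol_array symbol_array symbol_array_alt
  obtain ⟨g, hg⟩ : ∃ g, genome.toList = g := ⟨_, rfl⟩
  obtain ⟨s, hs⟩ : ∃ s, symbol.toList = s := ⟨_, rfl⟩
  simp only [hg, hs]
  obtain ⟨m, hm⟩ : ∃ m, g.length = m := ⟨_, rfl⟩
  simp only [hm]
  obtain ⟨hf, hhf⟩ : ∃ h, m / 2 = h := ⟨_, rfl⟩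
  have hhalf : PySem.Int.floordiv ((m : Nat) : Int) 2 = ((hf : Nat) : Int) := by
    rw [← hhf]; exact_mod_cast PySem.Int.floordiv_natCast m 2
  have hslice : PySem.List.slice g (some 0) (some ((hf : Nat) : Int)) = g.take hf := by
    simp
  simp only [hhalf, hslice]
  have hfle : hf ≤ m := by rw [← hhf]; exact Nat.div_le_self m 2
  have hextlen : (g ++ g.take hf).length = m + hf := by
    simp only [List.length_append, List.length_take, hm]
    rw [Nat.min_eq_left hfle]
  obtain ⟨base, hbase⟩ : ∃ b, kmer_count s (g.take hf) = b := ⟨_, rfl⟩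
  have hbase' : kmer_count_alt s (g.take hf) = base := hbase
  simp only [hbase, hbase']
  rw [pvPrefix_spec s (g ++ g.take hf) [0] 0]
  rw [pvPyRange_one m]
  rw [pvA_fold s (g ++ g.take hf) hf base (m-1)]
  rw [PySem.List.foldl_append_singleton_eq_map]
  rw [List.range_succ_eq_map, List.map_cons, List.map_map, List.map_map]
  simp only [Nat.cast_zero, List.singleton_append]
  congr 1
  apply List.map_congr_left
  intro j hj
  have hjm : j + 1 ≤ m := by
    have := List.mem_range.mp hj; omega
  simp only [Function.comp]
  have hc1 : ((j+1 : Nat) : Int) + ((hf : Nat) : Int) = ((j+1+hf : Nat) : Int) := by push_cast; ring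
  rw [hextlen, hc1]
  rw [pvPfx_get s (g ++ g.take hf) (m+hf) (j+1) (by omega),
      pvPfx_get s (g ++ g.take hf) (m+hf) (j+1+hf) (by omega),
      pvPfx_get s (g ++ g.take hf) (m+hf) hf (by omega)]
  rw [pvV_closed s (g ++ g.take hf) hf m base hextlen (j+1) hjm]
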